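-- pv_equiv track=rewrite | github.com/iamrishap/PythonBits | InterviewBits/dp/ways-to-color-3N-board.py | solve_another
-- ===== SOURCE A (Python) =====
-- def solve_another(A):
--     # ways to fill first column
--     c3 = 24  # when 3 colors (A,B,C,D) used: 4*3*2
--     c2 = 12  # when 2 colours (A,B,C) used: 4*3
--     # ways to fill 2nd column onwards
--     for i in range(2, A + 1):
--         temp = c3
--         c3 = (11 * c3 + 10 * c2) % 1000000007  # calculated manually
--         c2 = (5 * temp + 7 * c2) % 1000000007
--     return (c3 + c2) % 1000000007
-- ===== SOURCE B (Python) =====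
-- def solve_another(A):
--     MOD = 1000000007
--     def mat_mul(X, Y):
--         (a, b, c, d), (e, f, g, h) = X, Y
--         return ((a * e + b * g) % MOD, (a * f + b * h) % MOD,
--                 (c * e + d * g) % MOD, (c * f + d * h) % MOD)
--     def mat_pow(M, n):
--         R = (1, 0, 0, 1)
--         while n > 0:
--             if n % 2 == 1:
--                 R = mat_mul(R, M)
--             M = mat_mul(M, M)
--             n //= 2
--         return R
--     n = A - 1 if A > 1 else 0
--     a, b, c, d = mat_pow((11, 10, 5, 7), n)
--     c3 = (a * 24 + b * 12) % MOD
--     c2 = (c * 24 + d * 12) % MOD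
--     return (c3 + c2) % MOD
-- ===== Notes on version B (the rewrite author's own statement) =====
-- stated objective: faster
-- what changed: Replaces the O(N) linear recurrence loop by binary exponentiation of the 2x2 transition matrix ((11,10),(5,7)) mod 1e9+7, applied to the initial vector (24,12).
import Mathlib
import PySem

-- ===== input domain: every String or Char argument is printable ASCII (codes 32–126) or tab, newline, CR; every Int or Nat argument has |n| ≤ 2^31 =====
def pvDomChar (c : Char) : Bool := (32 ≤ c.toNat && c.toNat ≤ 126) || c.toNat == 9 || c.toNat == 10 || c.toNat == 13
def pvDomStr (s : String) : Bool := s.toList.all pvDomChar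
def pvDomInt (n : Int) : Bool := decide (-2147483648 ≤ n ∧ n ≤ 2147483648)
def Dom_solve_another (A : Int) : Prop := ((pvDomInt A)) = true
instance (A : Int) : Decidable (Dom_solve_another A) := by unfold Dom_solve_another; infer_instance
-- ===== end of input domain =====

-- B replaces A's O(N) recurrence loop by binary exponentiation of the 2x2 transition matrix mod 1e9+7 (objective: faster, asymptotic).

-- ===== PORT A =====
def solve_another (A : Int) : Int :=
  let st := (PySem.List.pyRange 2 (A + 1) 1).foldl
    (fun (s : Int × Int) _ =>
      let temp := s.1
      ((11 * s.1 + 10 * s.2) % 1000000007, (5 * temp + 7 * s.2) % 1000000007))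
    (24, 12)
  (st.1 + st.2) % 1000000007

-- ===== PORT B =====
def matMulB (X Y : Int × Int × Int × Int) : Int × Int × Int × Int :=
  match X, Y with
  | (a, b, c, d), (e, f, g, h) =>
    ((a * e + b * g) % 1000000007, (a * f + b * h) % 1000000007,
     (c * e + d * g) % 1000000007, (c * f + d * h) % 1000000007)

def matPowLoop (R M : Int × Int × Int × Int) (n : Nat) : Int × Int × Int × Int :=
  if n = 0 then R
  else matPowLoop (if n % 2 = 1 then matMulB R M else R) (matMulB M M) (n / 2)
termination_by n
decreasing_by omega

def solve_another_alt (A : Int) : Int :=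
  let n : Nat := if A > 1 then (A - 1).toNat else 0
  match matPowLoop (1, 0, 0, 1) (11, 10, 5, 7) n with
  | (a, b, c, d) =>
    let c3 := (a * 24 + b * 12) % 1000000007
    let c2 := (c * 24 + d * 12) % 1000000007
    (c3 + c2) % 1000000007

-- ===== PRECONDITION & SPEC =====
def Spec_solve_another (A : Int) (out : Int) : Prop := out = solve_another_alt A
instance (A : Int) (out : Int) : Decidable (Spec_solve_another A out) := by unfold Spec_solve_another; infer_instance

-- ===== CLAIM (what is proved, stated in full; the proofs are below) =====
def Claim_equal_solve_another : Prop := ∀ (A : Int), Dom_solve_another A → Spec_solve_another A (solve_another A)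

-- ===== LEMMAS AND PROOFS =====

abbrev pvK := ZMod 1000000007

def pvToM (X : Int × Int × Int × Int) : Matrix (Fin 2) (Fin 2) pvK :=
  !![(X.1 : pvK), (X.2.1 : pvK); (X.2.2.1 : pvK), (X.2.2.2 : pvK)]

def pvStep (v : Int × Int) : Int × Int :=
  ((11 * v.1 + 10 * v.2) % 1000000007, (5 * v.1 + 7 * v.2) % 1000000007)

def pvX : Matrix (Fin 2) (Fin 2) pvK := pvToM (11, 10, 5, 7)

theorem pv_cast_mod (x : Int) : ((x % 1000000007 : Int) : pvK) = (x : pvK) := by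
  have h : ((1000000007 : Nat) : Int) = 1000000007 := by norm_num
  rw [← h]
  exact ZMod.intCast_mod x 1000000007

theorem pv_eq_of_cast (x y : Int) (h : (x : pvK) = (y : pvK)) :
    x % 1000000007 = y % 1000000007 := by
  have h2 := (ZMod.intCast_eq_intCast_iff x y 1000000007).1 h
  have h3 : x % ((1000000007 : Nat) : Int) = y % ((1000000007 : Nat) : Int) := h2
  norm_num at h3
  exact h3

theorem pvToM_mul (X Y : Int × Int × Int × Int) :
    pvToM (matMulB X Y) = pvToM X * pvToM Y := by
  obtain ⟨a, b, c, d⟩ := X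
  obtain ⟨e, f, g, h⟩ := Y
  ext i j
  fin_cases i <;> fin_cases j <;>
    simp [matMulB, pvToM, Matrix.mul_apply, Fin.sum_univ_two, pv_cast_mod]

theorem pvToM_one : pvToM (1, 0, 0, 1) = 1 := by
  ext i j
  fin_cases i <;> fin_cases j <;> simp [pvToM]

theorem matPowLoop_cast (R M : Int × Int × Int × Int) (n : Nat) :
    pvToM (matPowLoop R M n) = pvToM R * (pvToM M) ^ n := by
  induction R, M, n using matPowLoop.induct with
  | case1 R M => simp [matPowLoop]
  | case2 R M n hn ih =>
    rw [matPowLoop, if_neg hn]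
    simp only [dite_eq_ite] at ih
    rw [ih, pvToM_mul]
    have hsq : (pvToM M * pvToM M) ^ (n / 2) = (pvToM M) ^ (2 * (n / 2)) := by
      rw [pow_mul, sq]
    by_cases hpar : n % 2 = 1
    · rw [if_pos hpar, pvToM_mul, hsq, mul_assoc]
      have : pvToM M * pvToM M ^ (2 * (n / 2)) = pvToM M ^ n := by
        rw [← pow_succ']
        congr 1
        omega
      rw [this]
    · rw [if_neg hpar, hsq]
      have h2 : 2 * (n / 2) = n := by omega
      rw [h2]

theorem pv_foldl_const {α β : Type} (f : β → β) (l : List α) (s : β) :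
    l.foldl (fun s _ => f s) s = f^[l.length] s := by
  induction l generalizing s with
  | nil => simp
  | cons x xs ih => simp [List.foldl, ih, Function.iterate_succ_apply]

theorem pv_iterate_cast (n : Nat) :
    (((pvStep^[n] (24, 12)).1 : pvK) = (pvX ^ n) 0 0 * 24 + (pvX ^ n) 0 1 * 12) ∧
    (((pvStep^[n] (24, 12)).2 : pvK) = (pvX ^ n) 1 0 * 24 + (pvX ^ n) 1 1 * 12) := by
  induction n with
  | zero => simp
  | succ n ih =>
    obtain ⟨ih1, ih2⟩ := ih
    rw [Function.iterate_succ_apply']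
    have hpow : pvX ^ (n + 1) = pvX * pvX ^ n := by rw [← pow_succ']
    constructor
    · show (((11 * (pvStep^[n] (24, 12)).1 + 10 * (pvStep^[n] (24, 12)).2) % 1000000007 : Int) : pvK) = _
      rw [pv_cast_mod]
      push_cast
      rw [ih1, ih2, hpow]
      simp [pvX, pvToM, Matrix.mul_apply, Fin.sum_univ_two]
      ring
    · show (((5 * (pvStep^[n] (24, 12)).1 + 7 * (pvStep^[n] (24, 12)).2) % 1000000007 : Int) : pvK) = _
      rw [pv_cast_mod]
      push_cast
      rw [ih1, ih2, hpow]
      simp [pvX, pvToM, Matrix.mul_apply, Fin.sum_univ_two]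
      ring

-- ===== VERDICT (by name: the statement is the Claim_ definition above) =====
theorem solve_another_spec : Claim_equal_solve_another := by
  intro A _
  show solve_another A = solve_another_alt A
  unfold solve_another solve_another_alt
  have hn : (if A > 1 then (A - 1).toNat else 0) = (A + 1 - 2).toNat := by
    split_ifs <;> omega
  rw [hn]
  set n : Nat := (A + 1 - 2).toNat with hdefn
  have hfold : (PySem.List.pyRange 2 (A + 1) 1).foldl
      (fun (s : Int × Int) _ =>
        let temp := s.1
        ((11 * s.1 + 10 * s.2) % 1000000007, (5 * temp + 7 * s.2) % 1000000007))
      (24, 12) = pvStep^[n] (24, 12) := by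
    have hfun : (fun (s : Int × Int) (_ : Int) =>
        let temp := s.1
        ((11 * s.1 + 10 * s.2) % 1000000007, (5 * temp + 7 * s.2) % 1000000007))
        = fun (s : Int × Int) (_ : Int) => pvStep s := by
      funext s x; simp [pvStep]
    rw [hfun, pv_foldl_const pvStep (PySem.List.pyRange 2 (A + 1) 1) (24, 12)]
    rw [PySem.List.length_pyRange_one]
  rw [hfold]
  obtain ⟨h1, h2⟩ := pv_iterate_cast n
  have hP := matPowLoop_cast (1, 0, 0, 1) (11, 10, 5, 7) n
  rw [pvToM_one, one_mul] at hP
  set P := matPowLoop (1, 0, 0, 1) (11, 10, 5, 7) n with hPdef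
  obtain ⟨a, b, c, d⟩ := P
  have ha : (a : pvK) = (pvX ^ n) 0 0 := by rw [pvX, ← hP]; simp [pvToM]
  have hb : (b : pvK) = (pvX ^ n) 0 1 := by rw [pvX, ← hP]; simp [pvToM]
  have hc : (c : pvK) = (pvX ^ n) 1 0 := by rw [pvX, ← hP]; simp [pvToM]
  have hd : (d : pvK) = (pvX ^ n) 1 1 := by rw [pvX, ← hP]; simp [pvToM]
  show ((pvStep^[n] (24, 12)).1 + (pvStep^[n] (24, 12)).2) % 1000000007
      = (match matPowLoop (1, 0, 0, 1) (11, 10, 5, 7) n with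
         | (a, b, c, d) =>
           ((a * 24 + b * 12) % 1000000007 + (c * 24 + d * 12) % 1000000007) % 1000000007)
  rw [← hPdef]
  show ((pvStep^[n] (24, 12)).1 + (pvStep^[n] (24, 12)).2) % 1000000007
      = ((a * 24 + b * 12) % 1000000007 + (c * 24 + d * 12) % 1000000007) % 1000000007
  apply pv_eq_of_cast
  push_cast [pv_cast_mod]
  rw [h1, h2, ha, hb, hc, hd]
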